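-- pv_equiv track=rewrite | github.com/AlifSrSE/ProblemSolves | 1180B-nickAndArray.py | alif
-- ===== SOURCE A (Python) =====
-- def alif(a):
--     n = len(a)
--     if n % 2 == 0:
--         modified_a = [min(x, -1 - x) for x in a]
--     else:
--         max_val = float('-inf')
--         max_index = -1
--         for i in range(n):
--             current_val = max(a[i], -1 - a[i])
--             if current_val > max_val:
--                 max_val = current_val
--                 max_index = i
--         modified_a = [min(x, -1 - x) if i != max_index else max(x, -1 - x) for i, x in enumerate(a)]
--     return " ".join(map(str, modified_a))
-- ===== SOURCE B (Python) =====
-- def alif(a):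
--     # Single left-to-right pass maintaining two candidate outputs (as string lists):
--     # `plain` = every element minimized, `flipped` = plain with the current best
--     # flip target un-minimized. No index bookkeeping, no second pass.
--     plain = []
--     flipped = []
--     best = None
--     for x in a:
--         lo, hi = (x, -1 - x) if x < -1 - x else (-1 - x, x)
--         if best is None or best < hi:
--             best = hi
--             flipped = plain + [str(hi)]
--         else:
--             flipped.append(str(lo))
--         plain.append(str(lo))
--     return " ".join(flipped if len(a) % 2 else plain)
-- ===== Notes on version B (the rewrite author's own statement) =====
-- stated objective: alternative
-- what changed: B is a single left-to-right pass with an accumulator that maintains two candidate stringified outputs (all-minimized, and with the running best element flipped) and picks one by parity at the end, instead of A's separate argmax scan followed by a conditional re-traversal comprehension.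
import Mathlib
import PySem

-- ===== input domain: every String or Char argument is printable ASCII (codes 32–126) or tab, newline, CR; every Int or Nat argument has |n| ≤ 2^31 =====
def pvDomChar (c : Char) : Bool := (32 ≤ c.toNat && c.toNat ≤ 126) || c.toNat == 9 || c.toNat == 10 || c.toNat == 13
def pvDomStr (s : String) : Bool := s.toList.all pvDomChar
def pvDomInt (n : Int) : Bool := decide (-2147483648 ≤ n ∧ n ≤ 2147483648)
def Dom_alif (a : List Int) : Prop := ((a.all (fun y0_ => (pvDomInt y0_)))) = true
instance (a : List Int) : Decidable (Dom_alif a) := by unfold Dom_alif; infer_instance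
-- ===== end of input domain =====

-- B replaces A's argmax scan + conditional re-traversal with ONE left-to-right pass that
-- maintains two candidate stringified outputs and picks one by parity (objective: alternative).

-- ===== PORT A =====
-- loop body of A's odd-length scan; max_val = float('-inf') is the `none` state of the Option
def alifStep (a : List Int) (s : Option Int × Int) (i : Int) : Option Int × Int :=
  let current := max (PySem.List.pyGetD a i 0) (-1 - PySem.List.pyGetD a i 0)
  match s.1 with
  | none => (some current, i)
  | some mv => if mv < current then (some current, i) else s

def alif (a : List Int) : String :=
  let n : Int := (a.length : Int)
  if PySem.Int.mod n 2 = 0 then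
    PySem.Str.join " " ((a.map (fun x => min x (-1 - x))).map PySem.Int.toStr)
  else
    -- a[i] for i in range(n) is always in range, so pyGetD is exact here
    let st := (PySem.List.pyRange 0 n).foldl (alifStep a) (none, -1)
    let modified := (PySem.List.enumerate a 0).map (fun p =>
      if p.1 ≠ st.2 then min p.2 (-1 - p.2) else max p.2 (-1 - p.2))
    PySem.Str.join " " (modified.map PySem.Int.toStr)

-- ===== PORT B =====
-- state = (plain, best, flipped) exactly as in Source B's loop
def alifAltStep (s : List String × Option Int × List String) (x : Int) :
    List String × Option Int × List String :=
  let p := if x < -1 - x then ((x, -1 - x) : Int × Int) else (-1 - x, x)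
  match s.2.1 with
  | none => (s.1 ++ [PySem.Int.toStr p.1], some p.2, s.1 ++ [PySem.Int.toStr p.2])
  | some b =>
      if b < p.2 then (s.1 ++ [PySem.Int.toStr p.1], some p.2, s.1 ++ [PySem.Int.toStr p.2])
      else (s.1 ++ [PySem.Int.toStr p.1], some b, s.2.2 ++ [PySem.Int.toStr p.1])

def alif_alt (a : List Int) : String :=
  let st := a.foldl alifAltStep ([], none, [])
  PySem.Str.join " " (if PySem.Int.mod (a.length : Int) 2 = 0 then st.1 else st.2.2)

-- ===== PRECONDITION & SPEC =====
def Spec_alif (a : List Int) (out : String) : Prop := out = alif_alt a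
instance (a : List Int) (out : String) : Decidable (Spec_alif a out) := by unfold Spec_alif; infer_instance

-- ===== CLAIM (what is proved, stated in full; the proofs are below) =====
def Claim_equal_alif : Prop := ∀ (a : List Int), Dom_alif a → Spec_alif a (alif a)

-- ===== LEMMAS AND PROOFS =====

lemma pv_mod_two (n : Nat) : PySem.Int.mod (n : Int) 2 = ((n % 2 : Nat) : Int) := by
  rw [PySem.Int.mod_eq_emod_of_pos (by norm_num)]; omega

-- "k is the first index attaining the minimum of l.take n" (via getD, all indices below n)
def FM (l : List Int) (n k : Nat) : Prop :=
  k < n ∧ (∀ j, j < k → l.getD k 0 < l.getD j 0) ∧ (∀ j, j < n → l.getD k 0 ≤ l.getD j 0)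

lemma FM_uniq {l : List Int} {n k k' : Nat} (h : FM l n k) (h' : FM l n k') : k = k' := by
  obtain ⟨hk, hs, hle⟩ := h
  obtain ⟨hk', hs', hle'⟩ := h'
  by_contra hne
  rcases Nat.lt_or_ge k k' with hlt | hge
  · have h1 := hs' k hlt
    have h2 := hle k' hk'
    omega
  · have hlt : k' < k := by omega
    have h1 := hs k' hlt
    have h2 := hle' k hk
    omega

lemma getD_base (a : List Int) (j : Nat) (h : j < a.length) :
    (a.map (fun x => min x (-1 - x))).getD j 0 = min (a.getD j 0) (-1 - a.getD j 0) := by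
  rw [List.getD_eq_getElem _ _ (by simpa using h), List.getD_eq_getElem _ _ h]
  simp

-- A's scan over range(n) lands on the first argmin of base (strict '>' update)
lemma foldA (a : List Int) (n : Nat) (h1 : 1 ≤ n) (hn : n ≤ a.length) :
    ∃ k : Nat, (List.range n).foldl (fun s (j : Nat) => alifStep a s (j : Int)) (none, -1)
        = (some (-1 - (a.map (fun x => min x (-1 - x))).getD k 0), (k : Int))
      ∧ FM (a.map (fun x => min x (-1 - x))) n k := by
  induction n, h1 using Nat.le_induction with
  | base =>
    have h0 : 0 < a.length := hn
    refine ⟨0, ?_, Nat.one_pos, by intro j hj; omega,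
      by intro j hj; interval_cases j; exact le_refl _⟩
    show (some (max (PySem.List.pyGetD a ((0:Nat):Int) 0) (-1 - PySem.List.pyGetD a ((0:Nat):Int) 0)), ((0:Nat):Int)) = _
    rw [PySem.List.pyGetD_natCast, getD_base a 0 h0]
    have hmx : max (a.getD 0 0) (-1 - a.getD 0 0) = -1 - min (a.getD 0 0) (-1 - a.getD 0 0) := by omega
    rw [hmx]
  | succ n hn1 ih =>
    obtain ⟨k, hfold, hk, hs, hle⟩ := ih (by omega)
    have hnlen : n < a.length := by omega
    rw [List.range_succ, List.foldl_append, hfold]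
    simp only [List.foldl_cons, List.foldl_nil, alifStep]
    have hget : PySem.List.pyGetD a (n : Int) 0 = a.getD n 0 := by
      rw [PySem.List.pyGetD_natCast]
    rw [hget]
    have hcur : max (a.getD n 0) (-1 - a.getD n 0)
        = -1 - (a.map (fun x => min x (-1 - x))).getD n 0 := by
      rw [getD_base a n hnlen]; omega
    rw [hcur]
    by_cases hc : -1 - (a.map (fun x => min x (-1 - x))).getD k 0
        < -1 - (a.map (fun x => min x (-1 - x))).getD n 0
    · refine ⟨n, by rw [if_pos hc], ?_, ?_, ?_⟩
      · omega
      · intro j hj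
        have h1 := hle j (by omega)
        omega
      · intro j hj
        rcases Nat.lt_or_ge j n with hjn | hjn
        · have h1 := hle j hjn
          omega
        · have : j = n := by omega
          subst this; exact le_refl _
    · refine ⟨k, by rw [if_neg hc], by omega, hs, ?_⟩
      intro j hj
      rcases Nat.lt_or_ge j n with hjn | hjn
      · exact hle j hjn
      · have : j = n := by omega
        subst this; omega

-- A's conditional comprehension = set-one-element on the common base list
lemma flip_eq (a : List Int) (k : Nat) (hk : k < a.length) :
    (PySem.List.enumerate a 0).map (fun p =>
        if p.1 ≠ (k : Int) then min p.2 (-1 - p.2) else max p.2 (-1 - p.2))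
      = (a.map (fun x => min x (-1 - x))).set k
          (-1 - (a.map (fun x => min x (-1 - x))).getD k 0) := by
  apply List.ext_getElem
  · simp [PySem.List.length_enumerate]
  · intro j hj hj'
    have hjl : j < a.length := by simpa [PySem.List.length_enumerate] using hj
    rw [List.getElem_map, PySem.List.getElem_enumerate a 0 j (by simpa [PySem.List.length_enumerate] using hjl)]
    simp only [List.getElem_set, zero_add]
    by_cases hjk : j = k
    · subst hjk
      rw [if_neg (by simp), if_pos rfl, getD_base a j hjl, List.getD_eq_getElem _ _ hjl]
      have : a[j] = a.getD j 0 := (List.getD_eq_getElem _ _ hjl).symm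
      rw [this]
      omega
    · have hne : ((j : Int)) ≠ (k : Int) := by exact_mod_cast hjk
      rw [if_pos hne, if_neg (fun h => hjk h.symm), List.getElem_map]

-- the pair B's loop destructures is (min, max)
lemma lohi (x : Int) :
    (if x < -1 - x then ((x, -1 - x) : Int × Int) else (-1 - x, x))
      = (min x (-1 - x), max x (-1 - x)) := by
  split_ifs <;> (apply Prod.ext <;> simp <;> omega)

-- invariant of B's single pass: plain is the minimized list, best is the running
-- maximum (= -1 - minimum of base), flipped is plain with the FIRST argmin flipped
lemma foldB (l : List Int) (hl : l ≠ []) :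
    ∃ k : Nat, l.foldl alifAltStep ([], none, [])
        = ((l.map (fun x => min x (-1 - x))).map PySem.Int.toStr,
           some (-1 - (l.map (fun x => min x (-1 - x))).getD k 0),
           (((l.map (fun x => min x (-1 - x))).set k
              (-1 - (l.map (fun x => min x (-1 - x))).getD k 0)).map PySem.Int.toStr))
      ∧ FM (l.map (fun x => min x (-1 - x))) l.length k := by
  induction l using List.reverseRecOn with
  | nil => exact absurd rfl hl
  | append_singleton l x ih =>
    rcases eq_or_ne l [] with hnil | hne
    · subst hnil
      refine ⟨0, ?_, ?_, by intro j hj; omega, ?_⟩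
      · simp only [List.nil_append, List.foldl_cons, List.foldl_nil, alifAltStep, lohi]
        have hmx : max x (-1 - x) = -1 - min x (-1 - x) := by omega
        simp [hmx]
      · simp
      · intro j hj
        simp only [List.nil_append, List.length_cons, List.length_nil] at hj
        interval_cases j
        exact le_refl _
    · obtain ⟨k, hfold, hk, hs, hle⟩ := ih hne
      set base := l.map (fun x => min x (-1 - x)) with hbase
      have hbl : base.length = l.length := by simp [hbase]
      have hkb : k < base.length := by omega
      have hmap : (l ++ [x]).map (fun x => min x (-1 - x)) = base ++ [min x (-1 - x)] := by
        simp [hbase]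
      have hgetD_lt : ∀ j, j < base.length → (base ++ [min x (-1 - x)]).getD j 0 = base.getD j 0 := by
        intro j hj
        rw [List.getD_eq_getElem _ _ (by simp; omega), List.getD_eq_getElem _ _ hj,
          List.getElem_append_left hj]
      have hgetD_last : (base ++ [min x (-1 - x)]).getD base.length 0 = min x (-1 - x) := by
        rw [List.getD_eq_getElem _ _ (by simp)]
        simp
      rw [List.foldl_append, hfold]
      simp only [List.foldl_cons, List.foldl_nil, alifAltStep, lohi]
      by_cases hc : -1 - base.getD k 0 < max x (-1 - x)
      · -- new running maximum: flip target moves to the last position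
        refine ⟨base.length, ?_, ?_, ?_, ?_⟩
        · rw [if_pos hc, hmap, hgetD_last]
          have hmx : max x (-1 - x) = -1 - min x (-1 - x) := by omega
          refine congrArg₂ _ (by simp) (congrArg₂ _ (by rw [hmx]) ?_)
          rw [List.set_append_right _ _ (le_refl _)]
          simp [hmx]
        · simp only [List.length_append, List.length_cons, List.length_nil]
          omega
        · intro j hj
          simp only [hmap]
          rw [hgetD_last, hgetD_lt j hj]
          have h1 := hle j (by omega)
          have h2 := hgetD_lt j hj
          omega
        · intro j hj
          simp only [List.length_append, List.length_cons, List.length_nil] at hj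
          simp only [hmap]
          rw [hgetD_last]
          rcases Nat.lt_or_ge j base.length with hjb | hjb
          · rw [hgetD_lt j hjb]
            have h1 := hle j (by omega)
            omega
          · have : j = base.length := by omega
            subst this
            rw [hgetD_last]
      · -- old best survives: flip target unchanged
        refine ⟨k, ?_, ?_, ?_, ?_⟩
        · rw [if_neg hc, hmap, hgetD_lt k hkb,
            List.set_append_left _ _ hkb]
          simp
        · simp only [List.length_append, List.length_cons, List.length_nil]
          omega
        · intro j hj
          simp only [hmap]
          rw [hgetD_lt k hkb, hgetD_lt j (by omega)]
          exact hs j hj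
        · intro j hj
          simp only [List.length_append, List.length_cons, List.length_nil] at hj
          simp only [hmap]
          rw [hgetD_lt k hkb]
          rcases Nat.lt_or_ge j base.length with hjb | hjb
          · rw [hgetD_lt j hjb]
            exact hle j (by omega)
          · have : j = base.length := by omega
            subst this
            rw [hgetD_last]
            omega

lemma alif_eq (a : List Int) : alif a = alif_alt a := by
  unfold alif alif_alt
  rcases eq_or_ne a [] with hnil | hne
  · subst hnil; rfl
  · have hlen : 1 ≤ a.length := List.length_pos_iff.mpr hne
    obtain ⟨k', hfoldB, hFMb⟩ := foldB a hne
    rw [hfoldB]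
    rcases Nat.even_or_odd a.length with he | ho
    · have h0 : a.length % 2 = 0 := Nat.even_iff.mp he
      have hA : ((a.length % 2 : Nat) : Int) = 0 := by exact_mod_cast h0
      simp only [pv_mod_two]
      rw [if_pos hA, if_pos hA]
    · have h1 : a.length % 2 = 1 := Nat.odd_iff.mp ho
      have hA : ¬ ((a.length % 2 : Nat) : Int) = 0 := by omega
      simp only [pv_mod_two]
      rw [if_neg hA, if_neg hA]
      obtain ⟨k, hfoldA, hFMa⟩ := foldA a a.length hlen (le_refl _)
      have hrange : PySem.List.pyRange 0 (a.length : Int) = (List.range a.length).map (fun j : Nat => (j : Int)) :=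
        PySem.List.pyRange_zero_natCast a.length
      rw [hrange, List.foldl_map, hfoldA]
      have hkk' : k = k' := FM_uniq hFMa (by simpa using hFMb)
      subst hkk'
      exact congrArg (fun m => PySem.Str.join " " (List.map PySem.Int.toStr m))
        (flip_eq a k (by simpa using hFMa.1))

-- ===== VERDICT (by name: the statement is the Claim_ definition above) =====
theorem alif_spec : Claim_equal_alif := by
  intro a _
  unfold Spec_alif
  exact alif_eq a
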